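-- pv_equiv track=rewrite | github.com/IvanPles/HexBot | src/hexbot.py | or_rule_and_update
-- ===== SOURCE A (Python) =====
-- from copy import deepcopy
--
-- def or_rule_and_update(vsc_carriers, carrier_union, carrier_intersection, verbose=False):
--     new_vcs = []
--     for carrier in vsc_carriers:
--         new_uninon = carrier_union.union(carrier)
--         new_intersec = carrier_intersection.intersection(carrier)
--
--         if new_intersec == set():
--             new_vcs.append(new_uninon)
--         else:
--             vsc_carriers_new = deepcopy(vsc_carriers)
--             vsc_carriers_new.remove(carrier)
--             res = or_rule_and_update(vsc_carriers_new, new_uninon, new_intersec)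
--             new_vcs.extend(res)
--     return new_vcs
-- ===== SOURCE B (Python) =====
-- def or_rule_and_update(vsc_carriers, carrier_union, carrier_intersection, verbose=False):
--     out = []
--     # explicit DFS stack of frames: (carriers still to iterate, full carrier pool
--     # of this level, accumulated union, accumulated intersection)
--     stack = [(list(vsc_carriers), list(vsc_carriers),
--               set(carrier_union), set(carrier_intersection))]
--     while stack:
--         pending, pool, u, i = stack.pop()
--         if not pending:
--             continue
--         carrier = pending[0]
--         stack.append((pending[1:], pool, u, i))  # rest of this level, after the child
--         new_union = u | carrier
--         new_intersec = i & carrier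
--         if not new_intersec:
--             out.append(new_union)
--         else:
--             child_pool = list(pool)
--             child_pool.remove(carrier)  # first set-equal element, as A does
--             stack.append((child_pool, child_pool, new_union, new_intersec))
--     return out
-- ===== Notes on version B (the rewrite author's own statement) =====
-- stated objective: alternative
-- what changed: Replaces A's recursion (which deepcopies the carrier list on every recursive call) by an iterative DFS over an explicit LIFO stack of frames (pending carriers of the level, the level's carrier pool, accumulated union, accumulated intersection), appending leaf unions to a single output list in the same pre-order.
import Mathlib
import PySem

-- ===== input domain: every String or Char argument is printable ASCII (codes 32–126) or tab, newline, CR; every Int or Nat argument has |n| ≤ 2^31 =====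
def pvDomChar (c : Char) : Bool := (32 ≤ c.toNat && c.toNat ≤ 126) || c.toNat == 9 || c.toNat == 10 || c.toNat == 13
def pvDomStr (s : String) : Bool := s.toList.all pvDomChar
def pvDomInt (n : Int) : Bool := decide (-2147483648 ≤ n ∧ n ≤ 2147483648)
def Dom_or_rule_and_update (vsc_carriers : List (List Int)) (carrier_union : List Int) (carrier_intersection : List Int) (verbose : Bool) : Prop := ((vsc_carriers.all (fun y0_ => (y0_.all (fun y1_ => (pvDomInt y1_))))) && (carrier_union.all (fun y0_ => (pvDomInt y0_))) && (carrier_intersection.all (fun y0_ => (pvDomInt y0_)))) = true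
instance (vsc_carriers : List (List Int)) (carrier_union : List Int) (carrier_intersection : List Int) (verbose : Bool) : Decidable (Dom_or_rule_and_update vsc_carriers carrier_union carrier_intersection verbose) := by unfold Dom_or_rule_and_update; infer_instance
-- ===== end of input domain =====

-- B rewrites A's recursive DFS as an iterative DFS over an explicit LIFO stack of frames; equal output proved.

-- ===== PORT A =====
-- shared Python primitive: list.remove(carrier) on a list of sets — drop the FIRST
-- element that is set-equal to carrier; none = ValueError (never hit here: carrier is drawn from the list)
def pyRemoveSetEq : List (List Int) → List Int → Option (List (List Int))
  | [], _ => none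
  | x :: xs, c =>
    if PySem.Set.equal (PySem.Set.ofList x) (PySem.Set.ofList c) then some xs
    else (pyRemoveSetEq xs c).map (x :: ·)

-- A's recursion, fuel-guarded to be structural: every recursive call removes one
-- carrier, so the fuel vsc_carriers.length + 1 given below never runs out (the 0
-- branch is unreachable from or_rule_and_update).  The input sets arrive as lists;
-- Set.ofList is applied where Python already holds a set.
def orGoA : Nat → List (List Int) → List Int → List Int → List (List Int)
  | 0, _, _, _ => []
  | fuel + 1, carriers, u, i =>
    carriers.foldl (fun acc c =>
      acc ++
        (let nu := PySem.Set.union (PySem.Set.ofList u) c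
         let ni := PySem.Set.inter (PySem.Set.ofList i) c
         if ni = ([] : List Int) then [nu]
         else match pyRemoveSetEq carriers c with
           | some cs => orGoA fuel cs nu ni
           | none => [])) []

def or_rule_and_update (vsc_carriers : List (List Int)) (carrier_union : List Int) (carrier_intersection : List Int) (verbose : Bool) : List (List Int) :=
  orGoA (vsc_carriers.length + 1) vsc_carriers carrier_union carrier_intersection

-- ===== PORT B =====
-- step budget for the fuel guard of the while loop: a frame whose pool has size n
-- can cause at most (pending + 1) * pvF n iterations
def pvF : Nat → Nat
  | 0 => 1
  | n + 1 => (n + 1) * pvF n + 1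

-- B's while loop over an explicit LIFO stack; a frame is
-- (carriers still to iterate at this level, the level's full pool, union, intersection).
-- One fuel unit per iteration; the top-level budget below is provably sufficient, so
-- the 0 branch is unreachable from or_rule_and_update_alt.
def orRunB : Nat → List (List (List Int) × List (List Int) × List Int × List Int) → List (List Int)
  | 0, _ => []
  | _ + 1, [] => []
  | fuel + 1, (pending, pool, u, i) :: rest =>
    match pending with
    | [] => orRunB fuel rest
    | c :: pend =>
      if PySem.Set.inter (PySem.Set.ofList i) c = ([] : List Int) then
        PySem.Set.union (PySem.Set.ofList u) c :: orRunB fuel ((pend, pool, u, i) :: rest)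
      else
        match pyRemoveSetEq pool c with
        | some cp =>
          orRunB fuel ((cp, cp, PySem.Set.union (PySem.Set.ofList u) c,
            PySem.Set.inter (PySem.Set.ofList i) c) :: (pend, pool, u, i) :: rest)
        | none => orRunB fuel ((pend, pool, u, i) :: rest)

def or_rule_and_update_alt (vsc_carriers : List (List Int)) (carrier_union : List Int) (carrier_intersection : List Int) (verbose : Bool) : List (List Int) :=
  orRunB ((vsc_carriers.length + 1) * pvF vsc_carriers.length + 1)
    [(vsc_carriers, vsc_carriers, carrier_union, carrier_intersection)]

-- ===== PRECONDITION & SPEC =====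
def Spec_or_rule_and_update (vsc_carriers : List (List Int)) (carrier_union : List Int) (carrier_intersection : List Int) (verbose : Bool) (out : List (List Int)) : Prop := out = or_rule_and_update_alt vsc_carriers carrier_union carrier_intersection verbose
instance (vsc_carriers : List (List Int)) (carrier_union : List Int) (carrier_intersection : List Int) (verbose : Bool) (out : List (List Int)) : Decidable (Spec_or_rule_and_update vsc_carriers carrier_union carrier_intersection verbose out) := by unfold Spec_or_rule_and_update; infer_instance

-- ===== CLAIM (what is proved, stated in full; the proofs are below) =====
def Claim_equal_or_rule_and_update : Prop := ∀ (vsc_carriers : List (List Int)) (carrier_union : List Int) (carrier_intersection : List Int) (verbose : Bool), Dom_or_rule_and_update vsc_carriers carrier_union carrier_intersection verbose → Spec_or_rule_and_update vsc_carriers carrier_union carrier_intersection verbose (or_rule_and_update vsc_carriers carrier_union carrier_intersection verbose)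

-- ===== LEMMAS AND PROOFS =====
theorem pvF_pos (n : Nat) : 0 < pvF n := by
  cases n <;> simp [pvF]

theorem pyRemoveSetEq_length {xs ys : List (List Int)} {c : List Int}
    (h : pyRemoveSetEq xs c = some ys) : ys.length + 1 = xs.length := by
  induction xs generalizing ys with
  | nil => simp [pyRemoveSetEq] at h
  | cons x xs ih =>
    simp only [pyRemoveSetEq] at h
    split at h
    · cases h; rfl
    · cases hr : pyRemoveSetEq xs c with
      | none => rw [hr] at h; simp at h
      | some zs => rw [hr] at h; simp at h; subst h; simp [ih hr]

-- what one carrier of a level with pool `pool` contributes to the output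
def pvBody (pool : List (List Int)) (u i : List Int) (c : List Int) : List (List Int) :=
  let nu := PySem.Set.union (PySem.Set.ofList u) c
  let ni := PySem.Set.inter (PySem.Set.ofList i) c
  if ni = ([] : List Int) then [nu]
  else match pyRemoveSetEq pool c with
    | some cs => orGoA pool.length cs nu ni
    | none => []

-- A's level is the concatenation of its carriers' contributions
theorem orGoA_flat (pool : List (List Int)) (u i : List Int) :
    orGoA (pool.length + 1) pool u i = pool.flatMap (pvBody pool u i) := by
  rw [orGoA, PySem.List.foldl_append_eq_flatMap]
  rfl

-- the step budget of a stack
def pvM (stack : List (List (List Int) × List (List Int) × List Int × List Int)) : Nat :=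
  (stack.map (fun f => (f.1.length + 1) * pvF f.2.1.length)).sum

-- the stack invariant: with enough fuel, orRunB returns the concatenation, frame by
-- frame, of the contributions of each frame's remaining carriers
theorem orRunB_flat (fuel : Nat) :
    ∀ stack, pvM stack ≤ fuel →
      orRunB fuel stack
        = stack.flatMap (fun f => f.1.flatMap (pvBody f.2.1 f.2.2.1 f.2.2.2)) := by
  induction fuel with
  | zero =>
    intro stack hM
    cases stack with
    | nil => rfl
    | cons f rest =>
      exfalso
      have h1 : 0 < (f.1.length + 1) * pvF f.2.1.length :=
        Nat.mul_pos (Nat.succ_pos _) (pvF_pos _)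
      simp only [pvM, List.map_cons, List.sum_cons] at hM
      omega
  | succ fuel ih =>
    intro stack hM
    match stack with
    | [] => rfl
    | (pending, pool, u, i) :: rest =>
      have hb := pvF_pos pool.length
      match pending with
      | [] =>
        simp only [pvM, List.map_cons, List.sum_cons, List.length_nil, Nat.zero_add,
          Nat.one_mul] at hM
        rw [orRunB, ih rest (by simp only [pvM]; omega)]
        simp
      | c :: pend =>
        simp only [pvM, List.map_cons, List.sum_cons, List.length_cons] at hM
        have e1 : (pend.length + 1 + 1) * pvF pool.length
            = (pend.length + 1) * pvF pool.length + pvF pool.length := by ring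
        rw [orRunB]
        by_cases hni : PySem.Set.inter (PySem.Set.ofList i) c = ([] : List Int)
        · rw [if_pos hni,
            ih ((pend, pool, u, i) :: rest)
              (by simp only [pvM, List.map_cons, List.sum_cons]; omega)]
          simp only [List.flatMap_cons]
          rw [show pvBody pool u i c = [PySem.Set.union (PySem.Set.ofList u) c] by
            simp [pvBody, hni]]
          simp
        · rw [if_neg hni]
          cases hr : pyRemoveSetEq pool c with
          | some cs =>
            dsimp only
            have hlen : cs.length + 1 = pool.length := pyRemoveSetEq_length hr
            have hF : pvF pool.length = (cs.length + 1) * pvF cs.length + 1 := by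
              rw [← hlen]; rfl
            rw [ih ((cs, cs, PySem.Set.union (PySem.Set.ofList u) c,
                  PySem.Set.inter (PySem.Set.ofList i) c) :: (pend, pool, u, i) :: rest)
                (by simp only [pvM, List.map_cons, List.sum_cons]; omega)]
            have hc : pvBody pool u i c
                = cs.flatMap (pvBody cs (PySem.Set.union (PySem.Set.ofList u) c)
                    (PySem.Set.inter (PySem.Set.ofList i) c)) := by
              rw [show pvBody pool u i c
                  = orGoA pool.length cs (PySem.Set.union (PySem.Set.ofList u) c)
                      (PySem.Set.inter (PySem.Set.ofList i) c) by
                simp [pvBody, hni, hr]]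
              rw [← hlen, orGoA_flat]
            simp only [List.flatMap_cons, hc, List.append_assoc]
          | none =>
            dsimp only
            rw [ih ((pend, pool, u, i) :: rest)
              (by simp only [pvM, List.map_cons, List.sum_cons]; omega)]
            simp only [List.flatMap_cons]
            rw [show pvBody pool u i c = [] by simp [pvBody, hni, hr]]
            simp

-- ===== VERDICT (by name: the statement is the Claim_ definition above) =====
theorem or_rule_and_update_spec : Claim_equal_or_rule_and_update := by
  intro vsc cu ci verbose _
  unfold Spec_or_rule_and_update or_rule_and_update or_rule_and_update_alt
  rw [orRunB_flat _ [(vsc, vsc, cu, ci)] (by simp only [pvM, List.map_cons,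
    List.map_nil, List.sum_cons, List.sum_nil]; omega), orGoA_flat]
  simp
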